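-- pv_equiv track=rewrite | github.com/lwierzb1/mgr-colorization-using-optimization | colorization_program/src/colorization_algorithm/colorization_using_optimization/image/colorization_preprocessor.py | _get_mbb
-- ===== SOURCE A (Python) =====
-- def _get_mbb(colorized_cells):
--     min_x = None
--     max_x = None
--     min_y = None
--     max_y = None
--     for cell in colorized_cells:
--         if min_x is None:
--             min_x = cell[0]
--         elif min_x is not None and cell[0] is not None:
--             min_x = min(min_x, cell[0])
--
--         if min_y is None:
--             min_y = cell[1]
--         elif min_y is not None and cell[1] is not None:
--             min_y = min(min_y, cell[1])
--
--         if max_x is None: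
--             max_x = cell[2]
--         elif max_x is not None and cell[2] is not None:
--             max_x = max(max_x, cell[2])
--
--         if max_y is None:
--             max_y = cell[3]
--         elif max_y is not None and cell[3] is not None:
--             max_y = max(max_y, cell[3])
--
--     return min_x, min_y, max_x, max_y
-- ===== SOURCE B (Python) =====
-- def _get_mbb(colorized_cells):
--     min_x = min((c[0] for c in colorized_cells if c[0] is not None), default=None)
--     min_y = min((c[1] for c in colorized_cells if c[1] is not None), default=None)
--     max_x = max((c[2] for c in colorized_cells if c[2] is not None), default=None)
--     max_y = max((c[3] for c in colorized_cells if c[3] is not None), default=None)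
--     return min_x, min_y, max_x, max_y
-- ===== Notes on version B (the rewrite author's own statement) =====
-- stated objective: simpler
-- what changed: Replaces A's single four-accumulator loop with per-field None-reset branching by four independent filtered min/max aggregations (one per coordinate, with default=None), matching A on all inputs including None coordinates and the empty list.
-- outside the precondition, e.g. on _get_mbb([]): A returns (None, None, None, None), B returns (None, None, None, None)
import Mathlib
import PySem

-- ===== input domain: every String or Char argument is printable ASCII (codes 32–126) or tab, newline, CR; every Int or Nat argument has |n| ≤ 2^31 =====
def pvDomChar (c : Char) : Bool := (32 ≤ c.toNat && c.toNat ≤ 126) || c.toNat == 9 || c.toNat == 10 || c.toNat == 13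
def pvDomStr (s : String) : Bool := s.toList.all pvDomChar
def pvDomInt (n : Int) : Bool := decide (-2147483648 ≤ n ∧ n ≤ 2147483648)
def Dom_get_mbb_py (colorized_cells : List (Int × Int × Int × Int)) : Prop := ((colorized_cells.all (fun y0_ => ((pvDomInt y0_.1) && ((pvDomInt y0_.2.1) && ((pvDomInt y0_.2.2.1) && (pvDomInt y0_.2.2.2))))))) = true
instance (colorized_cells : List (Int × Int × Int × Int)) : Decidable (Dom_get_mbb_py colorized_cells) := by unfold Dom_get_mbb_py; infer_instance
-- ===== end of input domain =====

-- B computes each bounding-box coordinate as its own filtered min/max aggregation instead of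
-- A's single four-accumulator loop with Optional resets (objective: simpler; same O(n) cost).
-- ===== PORT A =====
-- one loop step of A: the four if/elif blocks (on the Int-typed cells of this port the
-- 'cell[i] is not None' conjuncts of the elif conditions are always true)
def get_mbb_py_step (s : Option Int × Option Int × Option Int × Option Int)
    (cell : Int × Int × Int × Int) : Option Int × Option Int × Option Int × Option Int :=
  let mnx := match s.1 with | none => some cell.1 | some v => some (min v cell.1)
  let mny := match s.2.1 with | none => some cell.2.1 | some v => some (min v cell.2.1)
  let mxx := match s.2.2.1 with | none => some cell.2.2.1 | some v => some (max v cell.2.2.1)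
  let mxy := match s.2.2.2 with | none => some cell.2.2.2 | some v => some (max v cell.2.2.2)
  (mnx, mny, mxx, mxy)

def get_mbb_py (colorized_cells : List (Int × Int × Int × Int)) : Int × Int × Int × Int :=
  let s := colorized_cells.foldl get_mbb_py_step (none, none, none, none)
  -- on the admitted (nonempty) inputs all four accumulators are `some`; the 0 default is never used
  (s.1.getD 0, s.2.1.getD 0, s.2.2.1.getD 0, s.2.2.2.getD 0)

-- ===== PORT B =====
-- Source B's 'c[i] is not None' filter is identically true on Int-typed cells, so each
-- aggregation is min/max over the projected coordinates; default=None is the Option result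
def get_mbb_py_alt (colorized_cells : List (Int × Int × Int × Int)) : Int × Int × Int × Int :=
  ((PySem.List.min? (colorized_cells.map (fun c => c.1)) (fun x => x)).getD 0,
   (PySem.List.min? (colorized_cells.map (fun c => c.2.1)) (fun x => x)).getD 0,
   (PySem.List.max? (colorized_cells.map (fun c => c.2.2.1)) (fun x => x)).getD 0,
   (PySem.List.max? (colorized_cells.map (fun c => c.2.2.2)) (fun x => x)).getD 0)

-- ===== PRECONDITION & SPEC =====
-- Pre_ excludes only the empty list, on which both A and B return (None, None, None, None),
-- a tuple of Nones rather than a value of the declared Int×Int×Int×Int type.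
def Pre_get_mbb_py (colorized_cells : List (Int × Int × Int × Int)) : Prop :=
  colorized_cells ≠ []
instance (colorized_cells : List (Int × Int × Int × Int)) : Decidable (Pre_get_mbb_py colorized_cells) := by unfold Pre_get_mbb_py; infer_instance
def pvWitness_get_mbb_py : (List (Int × Int × Int × Int)) := [(1, 2, 3, 4), (0, 5, 7, 1)]
def Spec_get_mbb_py (colorized_cells : List (Int × Int × Int × Int)) (out : Int × Int × Int × Int) : Prop := out = get_mbb_py_alt colorized_cells
instance (colorized_cells : List (Int × Int × Int × Int)) (out : Int × Int × Int × Int) : Decidable (Spec_get_mbb_py colorized_cells out) := by unfold Spec_get_mbb_py; infer_instance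

-- ===== CLAIM (what is proved, stated in full; the proofs are below) =====
def Claim_equal_get_mbb_py : Prop := ∀ (colorized_cells : List (Int × Int × Int × Int)), Dom_get_mbb_py colorized_cells → Pre_get_mbb_py colorized_cells → Spec_get_mbb_py colorized_cells (get_mbb_py colorized_cells)

-- ===== LEMMAS AND PROOFS =====
-- From an all-`some` state, A's loop just folds min/max componentwise.
theorem get_mbb_foldl_some (l : List (Int × Int × Int × Int)) (a b c d : Int) :
    l.foldl get_mbb_py_step (some a, some b, some c, some d) =
      (some ((l.map (fun x => x.1)).foldl min a),
       some ((l.map (fun x => x.2.1)).foldl min b),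
       some ((l.map (fun x => x.2.2.1)).foldl max c),
       some ((l.map (fun x => x.2.2.2)).foldl max d)) := by
  induction l generalizing a b c d with
  | nil => rfl
  | cons h t ih => simpa [get_mbb_py_step] using ih (min a h.1) (min b h.2.1) (max c h.2.2.1) (max d h.2.2.2)

-- ===== VERDICT =====
theorem get_mbb_py_spec : Claim_equal_get_mbb_py := by
  intro cells _ hpre
  match cells with
  | [] => exact absurd rfl hpre
  | h :: t =>
    show get_mbb_py (h :: t) = get_mbb_py_alt (h :: t)
    simp only [get_mbb_py, get_mbb_py_alt, List.foldl_cons, List.map_cons,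
      PySem.List.min?_id_cons, PySem.List.max?_id_cons]
    rw [show get_mbb_py_step (none, none, none, none) h
          = (some h.1, some h.2.1, some h.2.2.1, some h.2.2.2) from rfl,
        get_mbb_foldl_some]
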